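-- pv_equiv track=rewrite | github.com/SDET-SOLOMAN/code_wars_python | kata_6s/sort_the_odd.py | sort_array3
-- ===== SOURCE A (Python) =====
-- def sort_array3(source_array):
--     odds = sorted([x for x in source_array if x % 2 != 0])
--     ind = 0
--     answer = []
--
--     for index, num in enumerate(source_array):
--
--         if num % 2 == 0:
--             answer.append(num)
--         else:
--             answer.append(odds[ind])
--             ind += 1
--
--     return answer
-- ===== SOURCE B (Python) =====
-- def _place(v, lst):
--     # lst has its odd elements already in ascending order; return a list with a new
--     # front slot for an odd value: v merged into the odd subsequence (odd values
--     # shift one odd-slot earlier until v's place; evens keep their relative spots).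
--     out, evens, i = [], [], 0
--     while i < len(lst):
--         x = lst[i]
--         if x % 2 == 0:
--             evens.append(x)
--         elif x < v:
--             out.append(x)
--             out.extend(evens)
--             evens = []
--         else:
--             break
--         i += 1
--     out.append(v)
--     out.extend(evens)
--     out.extend(lst[i:])
--     return out
--
--
-- def sort_array3(source_array):
--     result = []
--     for x in reversed(source_array):
--         if x % 2 == 0:
--             result = [x] + result
--         else:
--             result = _place(x, result)
--     return result
-- ===== Notes on version B (the rewrite author's own statement) =====
-- stated objective: alternative
-- what changed: B replaces the library sort plus counter-driven reinsertion by an insertion sort of the odd subsequence: a right-to-left fold that prepends evens and merges each odd into the already odd-sorted partial result with an ordered-insertion walk (no sorted() call, no index bookkeeping).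
import Mathlib
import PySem

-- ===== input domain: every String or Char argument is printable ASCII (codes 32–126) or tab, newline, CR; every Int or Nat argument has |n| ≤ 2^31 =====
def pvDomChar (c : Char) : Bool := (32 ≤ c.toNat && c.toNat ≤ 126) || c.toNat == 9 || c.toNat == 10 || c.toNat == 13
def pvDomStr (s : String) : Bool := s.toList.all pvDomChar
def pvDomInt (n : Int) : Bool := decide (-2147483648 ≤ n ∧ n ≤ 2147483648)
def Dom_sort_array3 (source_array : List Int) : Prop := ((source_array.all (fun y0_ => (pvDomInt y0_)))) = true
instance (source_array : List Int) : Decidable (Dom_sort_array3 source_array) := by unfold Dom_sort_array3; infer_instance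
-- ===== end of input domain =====

-- B re-implements A as an insertion sort of the odd subsequence (right-to-left fold with
-- ordered insertion; no library sort, no counter); same return value, no mutation of the argument.


-- ===== PORT A =====
-- odds[ind] is ported as getD: ind never leaves the range of odds, so Python never raises here.
def sort_array3 (source_array : List Int) : List Int :=
  let odds := PySem.List.sorted (source_array.filter (fun x => PySem.Int.mod x 2 != 0)) (fun x => x) false
  (source_array.foldl
    (fun (st : Nat × List Int) num =>
      if PySem.Int.mod num 2 == 0 then (st.1, st.2 ++ [num])
      else (st.1 + 1, st.2 ++ [odds.getD st.1 0]))
    (0, ([] : List Int))).2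

-- ===== PORT B =====
-- _place's while loop over lst (state out, evens, i) ported as structural recursion on the
-- unscanned suffix of lst carrying out and evens; lst[i:] at the break is that suffix.
def placeAux (v : Int) : List Int → List Int → List Int → List Int
  | [], out, evens => out ++ [v] ++ evens
  | x :: rest, out, evens =>
    if PySem.Int.mod x 2 == 0 then placeAux v rest out (evens ++ [x])
    else if x < v then placeAux v rest (out ++ [x] ++ evens) []
    else out ++ [v] ++ evens ++ (x :: rest)

-- 'for x in reversed(source_array)' is a foldl over the reversed list.
def sort_array3_alt (source_array : List Int) : List Int :=
  source_array.reverse.foldl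
    (fun result x =>
      if PySem.Int.mod x 2 == 0 then x :: result else placeAux x result [] [])
    []

-- ===== PRECONDITION & SPEC =====
def Spec_sort_array3 (source_array : List Int) (out : List Int) : Prop := out = sort_array3_alt source_array
instance (source_array : List Int) (out : List Int) : Decidable (Spec_sort_array3 source_array out) := by unfold Spec_sort_array3; infer_instance

-- ===== CLAIM (what is proved, stated in full; the proofs are below) =====
def Claim_equal_sort_array3 : Prop := ∀ (source_array : List Int), Dom_sort_array3 source_array → Spec_sort_array3 source_array (sort_array3 source_array)

-- ===== LEMMAS AND PROOFS =====

-- common description: weaveD xs os keeps evens and fills odd slots from os in order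
def weaveD : List Int → List Int → List Int
  | [], _ => []
  | x :: t, os =>
    if PySem.Int.mod x 2 == 0 then x :: weaveD t os
    else os.getD 0 0 :: weaveD t os.tail

-- A's loop with a counter into a fixed list
def wv (odds : List Int) : List Int → Nat → List Int
  | [], _ => []
  | x :: t, k =>
    if PySem.Int.mod x 2 == 0 then x :: wv odds t k
    else odds.getD k 0 :: wv odds t (k + 1)

theorem wv_eq_weave_drop (odds : List Int) : ∀ (xs : List Int) (k : Nat),
    wv odds xs k = weaveD xs (odds.drop k) := by
  intro xs
  induction xs with
  | nil => intro k; rfl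
  | cons x t ih =>
    intro k
    rw [wv, weaveD]
    by_cases hcond : (PySem.Int.mod x 2 == 0) = true
    · rw [if_pos hcond, if_pos hcond, ih k]
    · rw [if_neg hcond, if_neg hcond, ih (k + 1)]
      congr 1
      · simp [List.getD_eq_getElem?_getD, List.getElem?_drop]
      · congr 1
        rw [List.tail_drop]

theorem foldA_eq_wv (odds : List Int) : ∀ (xs : List Int) (k : Nat) (acc : List Int),
    (xs.foldl
      (fun (st : Nat × List Int) num =>
        if PySem.Int.mod num 2 == 0 then (st.1, st.2 ++ [num])
        else (st.1 + 1, st.2 ++ [odds.getD st.1 0]))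
      (k, acc)) = (k + (xs.filter (fun x => PySem.Int.mod x 2 != 0)).length,
                   acc ++ wv odds xs k) := by
  intro xs
  induction xs with
  | nil => intro k acc; simp [wv]
  | cons x t ih =>
    intro k acc
    rw [List.foldl_cons, wv, List.filter_cons]
    by_cases hcond : (PySem.Int.mod x 2 == 0) = true
    · have hne : ¬ ((PySem.Int.mod x 2 != 0) = true) := by simp [bne] at hcond ⊢; exact hcond
      rw [if_pos hcond, if_pos hcond, if_neg hne, ih k (acc ++ [x])]
      simp
    · have hne : (PySem.Int.mod x 2 != 0) = true := by simp [bne] at hcond ⊢; exact hcond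
      rw [if_neg hcond, if_neg hcond, if_pos hne, ih (k + 1) (acc ++ [odds.getD k 0])]
      simp
      omega

-- the sorted odd subsequence
def sOdds (xs : List Int) : List Int :=
  PySem.List.sorted (xs.filter (fun x => PySem.Int.mod x 2 != 0)) (fun x => x) false

-- placeAux on a weave of (t, s): v is merged into s by ordered insertion, pending evens land
-- right after the value that fills the new front slot
theorem placeAux_weave (v : Int) : ∀ (t s out evens : List Int),
    (∀ a ∈ s, ¬ ((PySem.Int.mod a 2 == 0) = true)) →
    s.length = (t.filter (fun x => PySem.Int.mod x 2 != 0)).length →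
    placeAux v (weaveD t s) out evens
      = out ++ (List.orderedInsert (· ≤ ·) v s).getD 0 0
          :: (evens ++ weaveD t (List.orderedInsert (· ≤ ·) v s).tail) := by
  intro t
  induction t with
  | nil =>
    intro s out evens _ hlen
    have hs : s = [] := by simpa using List.length_eq_zero_iff.mp (by simpa using hlen)
    subst hs
    simp [weaveD, placeAux, List.orderedInsert]
  | cons x t ih =>
    intro s out evens hodd hlen
    by_cases hx : (PySem.Int.mod x 2 == 0) = true
    · have hne : ¬ ((PySem.Int.mod x 2 != 0) = true) := by simp [bne] at hx ⊢; exact hx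
      rw [weaveD, if_pos hx, placeAux, if_pos hx,
        ih s out (evens ++ [x]) hodd (by rw [hlen, List.filter_cons, if_neg hne]),
        weaveD, if_pos hx]
      simp
    · have hne : (PySem.Int.mod x 2 != 0) = true := by simp [bne] at hx ⊢; exact hx
      have hlen' : s.length = (t.filter (fun x => PySem.Int.mod x 2 != 0)).length + 1 := by
        rw [hlen, List.filter_cons, if_pos hne]; simp
      obtain ⟨s0, s', rfl⟩ : ∃ s0 s', s = s0 :: s' := by
        cases s with
        | nil => simp at hlen'
        | cons a b => exact ⟨a, b, rfl⟩
      have hs0 : ¬ ((PySem.Int.mod s0 2 == 0) = true) := hodd s0 (by simp)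
      rw [weaveD, if_neg hx]
      simp only [List.getD_cons_zero, List.tail_cons]
      rw [placeAux, if_neg hs0]
      by_cases hlt : s0 < v
      · have hnle : ¬ v ≤ s0 := not_le.mpr hlt
        rw [if_pos hlt, List.orderedInsert,
          if_neg (by simpa using hnle),
          ih s' (out ++ [s0] ++ evens) [] (fun a ha => hodd a (by simp [ha]))
            (by simpa using hlen'),
          weaveD, if_neg hx]
        simp
      · have hle : v ≤ s0 := le_of_not_gt hlt
        rw [if_neg (by simpa using hlt), List.orderedInsert, if_pos (by simpa using hle)]
        simp only [List.getD_cons_zero, List.tail_cons]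
        rw [weaveD, if_neg hx]
        simp

theorem sOdds_cons_even (x : Int) (t : List Int) (hx : (PySem.Int.mod x 2 == 0) = true) :
    sOdds (x :: t) = sOdds t := by
  have hne : ¬ ((PySem.Int.mod x 2 != 0) = true) := by simp [bne] at hx ⊢; exact hx
  unfold sOdds
  rw [List.filter_cons, if_neg hne]

theorem sOdds_cons_odd (x : Int) (t : List Int) (hx : ¬ ((PySem.Int.mod x 2 == 0) = true)) :
    sOdds (x :: t) = List.orderedInsert (· ≤ ·) x (sOdds t) := by
  have hne : (PySem.Int.mod x 2 != 0) = true := by simp [bne] at hx ⊢; exact hx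
  unfold sOdds
  rw [List.filter_cons, if_pos hne]
  apply PySem.List.sorted_id_eq_of_perm_of_pairwise
  · exact (List.perm_orderedInsert _ x _).trans
      ((PySem.List.sorted_perm _ _ _).cons x)
  · exact List.Pairwise.orderedInsert x _ (PySem.List.sorted_pairwise _ _)

theorem mem_sOdds_odd (xs : List Int) :
    ∀ a ∈ sOdds xs, ¬ ((PySem.Int.mod a 2 == 0) = true) := by
  intro a ha
  have : a ∈ xs.filter (fun x => PySem.Int.mod x 2 != 0) :=
    (PySem.List.mem_sorted _ _ _ _).mp ha
  have := List.of_mem_filter this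
  simp [bne] at this ⊢
  exact this

theorem length_sOdds (xs : List Int) :
    (sOdds xs).length = (xs.filter (fun x => PySem.Int.mod x 2 != 0)).length := by
  unfold sOdds; exact PySem.List.length_sorted _ _ _

-- B computes the weave of the sorted odd subsequence
theorem alt_eq_weave (xs : List Int) : sort_array3_alt xs = weaveD xs (sOdds xs) := by
  unfold sort_array3_alt
  rw [List.foldl_reverse]
  induction xs with
  | nil => rfl
  | cons x t ih =>
    rw [List.foldr_cons, ih]
    by_cases hx : (PySem.Int.mod x 2 == 0) = true
    · rw [if_pos hx, weaveD, if_pos hx, sOdds_cons_even x t hx]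
    · rw [if_neg hx, weaveD, if_neg hx, sOdds_cons_odd x t hx,
        placeAux_weave x t (sOdds t) [] [] (mem_sOdds_odd t) (length_sOdds t)]
      simp

-- ===== VERDICT (by name: the statement is the Claim_ definition above) =====
theorem sort_array3_spec : Claim_equal_sort_array3 := by
  intro xs _
  unfold Spec_sort_array3
  have hA : sort_array3 xs = weaveD xs (sOdds xs) := by
    show (xs.foldl
      (fun (st : Nat × List Int) num =>
        if PySem.Int.mod num 2 == 0 then (st.1, st.2 ++ [num])
        else (st.1 + 1, st.2 ++ [(sOdds xs).getD st.1 0]))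
      (0, ([] : List Int))).2 = _
    rw [foldA_eq_wv, wv_eq_weave_drop]
    simp
  rw [hA, alt_eq_weave]
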